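-- pv_equiv track=rewrite | github.com/lsh0927/Jungle10_Algo | 알고리즘고득점kit/스택&큐/기능개발.py | solution
-- ===== SOURCE A (Python) =====
-- def solution(progresses, speeds):
--     answer = []
--     days = []
--
--     for i in range(len(speeds)):
--         cur_pro = progresses[i]
--         tmp = 0
--         while cur_pro < 100:
--             cur_pro += speeds[i]
--             tmp += 1
--         days.append(tmp)
--
--     count=1
--     max_day=days[0]
--
--     for i in range(1, len(days)):
--         if max_day>= days[i]:
--             count+=1
--         else:
--             answer.append(count)
--             count=1
--             max_day=days[i]
--
--     answer.append(count)
--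
--     return answer
-- ===== SOURCE B (Python) =====
-- def solution(progresses, speeds):
--     # closed-form release day per feature instead of a count-up loop
--     days = [0 if p >= 100 else -(-(100 - p) // s) for p, s in zip(progresses, speeds)]
--     res = []
--     leader = None
--     for d in days:
--         if res and leader >= d:
--             res[-1] += 1
--         else:
--             res.append(1)
--             leader = d
--     return res
-- ===== Notes on version B (the rewrite author's own statement) =====
-- stated objective: alternative
-- what changed: Each feature's release day is computed with a closed-form ceiling division instead of A's count-up while loop, and the grouping pass increments the last emitted batch count in place instead of carrying a separate counter variable.
-- outside the precondition, e.g. on solution([], [3]): A raises IndexError, B returns []; on solution([42], [7, 7]): A raises IndexError, B returns [1]; on solution([55, 60], [9, 9, 9]): A raises IndexError, B returns [2]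
import Mathlib
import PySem

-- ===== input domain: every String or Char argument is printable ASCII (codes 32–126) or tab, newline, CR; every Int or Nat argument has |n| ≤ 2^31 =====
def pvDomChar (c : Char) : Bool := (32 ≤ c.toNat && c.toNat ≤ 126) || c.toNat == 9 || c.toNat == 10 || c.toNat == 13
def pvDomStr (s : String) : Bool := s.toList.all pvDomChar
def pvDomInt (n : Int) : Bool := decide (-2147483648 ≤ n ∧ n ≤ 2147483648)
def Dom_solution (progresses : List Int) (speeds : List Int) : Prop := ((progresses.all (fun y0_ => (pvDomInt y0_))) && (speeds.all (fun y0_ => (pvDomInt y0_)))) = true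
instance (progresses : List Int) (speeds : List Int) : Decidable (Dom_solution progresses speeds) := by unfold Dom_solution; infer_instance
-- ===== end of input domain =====

-- B replaces A's per-feature count-up while loop with a closed-form ceiling division and merges the
-- grouping counter into the output list; equivalence is about the return value.

-- ===== PORT A =====
-- `while cur_pro < 100: cur_pro += s; tmp += 1`; the `else tmp` branch on s ≤ 0 is a totality
-- guard only: Python diverges there, and Pre_solution excludes those inputs.
def pvWhile (s : Int) (cur : Int) (tmp : Int) : Int :=
  if h : cur < 100 then
    if hs : 0 < s then pvWhile s (cur + s) (tmp + 1) else tmp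
  else tmp
termination_by (100 - cur).toNat
decreasing_by omega

def pvStepA (st : List Int × Int × Int) (d : Int) : List Int × Int × Int :=
  if st.2.2 ≥ d then (st.1, st.2.1 + 1, st.2.2)
  else (st.1 ++ [st.2.1], 1, d)

def solution (progresses : List Int) (speeds : List Int) : List Int :=
  -- for i in range(len(speeds)): days.append(while-loop count); getD's default 0 is never
  -- read under Pre_solution (Python raises IndexError when i ≥ len(progresses))
  let days := (List.range speeds.length).map
    (fun i => pvWhile (speeds.getD i 0) (progresses.getD i 0) 0)
  match days with
  | [] => []  -- Python: days[0] raises IndexError here; excluded by Pre_solution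
  | d0 :: rest =>
      let st := rest.foldl pvStepA ([], 1, d0)
      st.1 ++ [st.2.1]

-- ===== PORT B =====
-- `0 if p >= 100 else -(-(100 - p) // s)`
def pvDay (p : Int) (s : Int) : Int :=
  if p ≥ 100 then 0 else -(PySem.Int.floordiv (-(100 - p)) s)

-- `if res and leader >= d: res[-1] += 1 else: res.append(1); leader = d`
-- (leader is only read when res ≠ [], where it is `some`; getD 0 is a totality default)
def pvStepB (st : List Int × Option Int) (d : Int) : List Int × Option Int :=
  if st.1 ≠ [] ∧ st.2.getD 0 ≥ d then
    (st.1.dropLast ++ [st.1.getLast?.getD 0 + 1], st.2)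
  else (st.1 ++ [1], some d)

def solution_alt (progresses : List Int) (speeds : List Int) : List Int :=
  let days := List.zipWith pvDay progresses speeds
  (days.foldl pvStepB ([], none)).1

-- ===== PRECONDITION & SPEC =====
-- Pre_ = exactly the inputs where Python A returns: speeds nonempty and no longer than progresses
-- (else IndexError, e.g. on ([], [3]), ([42], [7, 7]), ([55, 60], [9, 9, 9]), ([101, 102], [4, 4, 4, 4])),
-- and each incomplete feature has a positive speed (else the while loop diverges).
def Pre_solution (progresses : List Int) (speeds : List Int) : Prop :=
  speeds ≠ [] ∧ speeds.length ≤ progresses.length ∧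
    ∀ i : Nat, i < speeds.length → (100 ≤ progresses.getD i 0 ∨ 0 < speeds.getD i 0)
instance (progresses : List Int) (speeds : List Int) : Decidable (Pre_solution progresses speeds) := by
  unfold Pre_solution; infer_instance

def pvWitness_solution : List Int × List Int := ([100], [1])

def Spec_solution (progresses : List Int) (speeds : List Int) (out : List Int) : Prop := out = solution_alt progresses speeds
instance (progresses : List Int) (speeds : List Int) (out : List Int) : Decidable (Spec_solution progresses speeds out) := by unfold Spec_solution; infer_instance

-- ===== CLAIM (what is proved, stated in full; the proofs are below) =====
def Claim_equal_solution : Prop := ∀ (progresses : List Int) (speeds : List Int), Dom_solution progresses speeds → Pre_solution progresses speeds → Spec_solution progresses speeds (solution progresses speeds)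

-- ===== LEMMAS AND PROOFS =====

-- A's while loop computes the ceiling division of the remaining progress by the speed.
theorem pvWhile_eq (s : Int) (hs : 0 < s) : ∀ (cur tmp : Int),
    pvWhile s cur tmp = tmp + (if 100 ≤ cur then 0 else -(PySem.Int.floordiv (-(100 - cur)) s)) := by
  intro cur tmp
  induction cur, tmp using pvWhile.induct s with
  | case1 cur tmp h hs' ih =>
      rw [pvWhile]
      simp only [dif_pos h, dif_pos hs', ih, if_neg (show ¬ 100 ≤ cur by omega)]
      by_cases hc : 100 ≤ cur + s
      · rw [if_pos hc]
        have : -(PySem.Int.floordiv (-(100 - cur)) s) = 1 :=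
          (PySem.Int.neg_floordiv_neg_eq_iff_of_pos hs).mpr ⟨by nlinarith, by nlinarith⟩
        omega
      · rw [if_neg hc]
        set q := -(PySem.Int.floordiv (-(100 - (cur + s))) s) with hq
        have hb := (PySem.Int.neg_floordiv_neg_eq_iff_of_pos (a := 100 - (cur + s)) hs).mp hq.symm
        have : -(PySem.Int.floordiv (-(100 - cur)) s) = q + 1 :=
          (PySem.Int.neg_floordiv_neg_eq_iff_of_pos hs).mpr ⟨by nlinarith, by nlinarith⟩
        omega
  | case2 cur tmp h hs' => omega
  | case3 cur tmp h =>
      rw [pvWhile]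
      simp only [dif_neg h, if_pos (show (100:Int) ≤ cur by omega)]
      omega

-- days lists agree under Pre_.
theorem days_eq (progresses speeds : List Int)
    (hle : speeds.length ≤ progresses.length)
    (hpos : ∀ i : Nat, i < speeds.length → (100 ≤ progresses.getD i 0 ∨ 0 < speeds.getD i 0)) :
    (List.range speeds.length).map
      (fun i => pvWhile (speeds.getD i 0) (progresses.getD i 0) 0)
      = List.zipWith pvDay progresses speeds := by
  apply List.ext_getElem
  · simp [List.length_zipWith]; omega
  · intro i h1 h2
    have hi : i < speeds.length := by simpa using h1
    have hip : i < progresses.length := by omega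
    have hgs : speeds.getD i 0 = speeds[i] := List.getD_eq_getElem _ _ hi
    have hgp : progresses.getD i 0 = progresses[i] := List.getD_eq_getElem _ _ hip
    simp only [List.getElem_map, List.getElem_range, List.getElem_zipWith, hgs, hgp]
    rcases hpos i hi with hp | hsp
    · rw [hgp] at hp
      rw [pvWhile]
      simp [pvDay, hp, show ¬ progresses[i] < 100 by omega]
    · rw [hgs] at hsp
      rw [pvWhile_eq _ hsp]
      simp only [pvDay, ge_iff_le]
      split_ifs with h <;> omega

-- grouping folds agree: B's in-place last-element increment tracks A's (answer, count, max_day).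
theorem fold_eq (l : List Int) : ∀ (ans : List Int) (count maxd : Int),
    (l.foldl pvStepB (ans ++ [count], some maxd)).1 =
      (let st := l.foldl pvStepA (ans, count, maxd); st.1 ++ [st.2.1]) := by
  induction l with
  | nil => intro ans count maxd; simp
  | cons d t ih =>
      intro ans count maxd
      simp only [List.foldl_cons]
      by_cases hc : maxd ≥ d
      · have hB : pvStepB (ans ++ [count], some maxd) d = (ans ++ [count + 1], some maxd) := by
          simp [pvStepB, hc]
        have hA : pvStepA (ans, count, maxd) d = (ans, count + 1, maxd) := by
          simp [pvStepA, hc]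
        rw [hB, hA, ih]
      · have hB : pvStepB (ans ++ [count], some maxd) d = ((ans ++ [count]) ++ [1], some d) := by
          simp [pvStepB, hc]
        have hA : pvStepA (ans, count, maxd) d = (ans ++ [count], 1, d) := by
          simp [pvStepA, hc]
        rw [hB, hA, ih]

-- ===== VERDICT (by name: the statement is the Claim_ definition above) =====
theorem solution_spec : Claim_equal_solution := by
  intro progresses speeds _ hpre
  obtain ⟨hne, hle, hpos⟩ := hpre
  unfold Spec_solution solution solution_alt
  rw [days_eq progresses speeds hle hpos]
  obtain ⟨d0, rest, hd⟩ : ∃ d0 rest, List.zipWith pvDay progresses speeds = d0 :: rest := by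
    cases h : List.zipWith pvDay progresses speeds with
    | nil =>
        exfalso
        have hlen := congrArg List.length h
        simp only [List.length_zipWith, List.length_nil] at hlen
        have hs0 : speeds.length ≠ 0 := by simpa [List.length_eq_zero_iff] using hne
        omega
    | cons a t => exact ⟨a, t, rfl⟩
  rw [hd]
  have h0 : pvStepB ([], none) d0 = ([1], some d0) := by simp [pvStepB]
  simp only [List.foldl_cons, h0]
  have h1 := fold_eq rest [] 1 d0
  simp only [List.nil_append] at h1
  exact h1.symm
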